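-- pv_equiv track=rewrite | github.com/miliar/Code_Jam_Webscraper | solutions_python/solutions_year17_round0_nr3/1441.py | solution_dequeue
-- ===== SOURCE A (Python) =====
-- from collections import deque
--
-- def solution_dequeue(stalls, people):
--     distances = deque((stalls,))
--     left, right = stalls, stalls
--     while people:
--         people -= 1
--         dist = distances.popleft()
--         left = dist // 2
--         right = dist - left
--         left, right = (left, right) if left >= right else (right, left)
--         left -= 1
--         left, right = (left, right) if left >= right else (right, left)
--         distances.append(left)
--         distances.append(right)
--     return '{} {}'.format(left, right)
-- ===== SOURCE B (Python) =====
-- def solution_dequeue(stalls, people):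
--     # Closed form: the p-th person (BFS order) takes the gap
--     # d = (stalls - reverse_bits(i)) // 2**L where p = 2**L + i.
--     if people == 0:
--         return '{} {}'.format(stalls, stalls)
--     L = people.bit_length() - 1
--     i = people - (1 << L)
--     x = 0
--     for _ in range(L):
--         x = 2 * x + (i & 1)
--         i >>= 1
--     d = (stalls - x) // (1 << L)
--     return '{} {}'.format(d // 2, (d - 1) // 2)
-- ===== Notes on version B (the rewrite author's own statement) =====
-- stated objective: faster
-- what changed: A simulates every person with a deque of gaps (O(people) pops); B computes the last person's gap directly by a closed form, d = (stalls - reverse_bits(i)) // 2**L where people = 2**L + i, using only the bits of people.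
import Mathlib
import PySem

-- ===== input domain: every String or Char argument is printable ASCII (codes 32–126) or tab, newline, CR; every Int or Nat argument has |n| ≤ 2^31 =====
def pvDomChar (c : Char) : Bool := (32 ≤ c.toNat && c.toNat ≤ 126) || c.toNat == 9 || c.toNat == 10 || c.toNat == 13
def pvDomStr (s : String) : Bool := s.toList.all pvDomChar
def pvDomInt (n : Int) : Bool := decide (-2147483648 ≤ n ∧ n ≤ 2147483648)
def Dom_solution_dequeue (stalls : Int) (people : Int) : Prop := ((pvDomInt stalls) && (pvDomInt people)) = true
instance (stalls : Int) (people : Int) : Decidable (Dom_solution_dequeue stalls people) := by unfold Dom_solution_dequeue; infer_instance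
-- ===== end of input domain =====

-- B replaces A's O(people) deque simulation by an O(log people) closed form: the gap split by the
-- last person is (stalls - reverse_bits(i)) // 2^L where people = 2^L + i.

-- ===== PORT A =====
-- A's deque, in the standard two-list functional representation (front ++ back.reverse),
-- so that popleft and append are O(1) as in collections.deque.
def pvPopleft (front back : List Int) : Option (Int × List Int × List Int) :=
  match front with
  | d :: f => some (d, f, back)
  | [] =>
    match back.reverse with
    | [] => none
    | d :: f => some (d, f, [])

-- A's while loop; fuel = people.toNat (Pre_ guarantees people ≥ 0, where the loop runs exactly
-- that many times).  The 'none' branch is unreachable: the deque starts nonempty and only grows.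
def pvLoopA (front back : List Int) (left right : Int) : Nat → Int × Int
  | 0 => (left, right)
  | n+1 =>
    match pvPopleft front back with
    | none => (left, right)
    | some (dist, f, b) =>
      let left := PySem.Int.floordiv dist 2
      let right := dist - left
      let p := if left ≥ right then (left, right) else (right, left)
      let left := p.1 - 1
      let right := p.2
      let q := if left ≥ right then (left, right) else (right, left)
      pvLoopA f (q.2 :: q.1 :: b) q.1 q.2 n

def solution_dequeue (stalls : Int) (people : Int) : String :=
  let r := pvLoopA [stalls] [] stalls stalls people.toNat
  PySem.Int.toStr r.1 ++ " " ++ PySem.Int.toStr r.2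

-- ===== PORT B =====
-- the bit-reversal loop of Source B: x = 2*x + (i & 1); i >>= 1, repeated L times
def pvRevBits : Nat → Nat → Nat → Nat
  | 0, _, x => x
  | l+1, i, x => pvRevBits l (i / 2) (2 * x + i % 2)

def solution_dequeue_alt (stalls : Int) (people : Int) : String :=
  if people = 0 then PySem.Int.toStr stalls ++ " " ++ PySem.Int.toStr stalls
  else
    let L := PySem.Int.bitLength people - 1
    let i := people.toNat - 2 ^ L
    let x := pvRevBits L i 0
    let d := PySem.Int.floordiv (stalls - (x : Int)) ((2 : Int) ^ L)
    PySem.Int.toStr (PySem.Int.floordiv d 2) ++ " " ++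
      PySem.Int.toStr (PySem.Int.floordiv (d - 1) 2)

-- ===== PRECONDITION & SPEC =====
-- Pre_ excludes people < 0, on which A's 'while people:' loop decrements past zero and never terminates.
def Pre_solution_dequeue (stalls : Int) (people : Int) : Prop := 0 ≤ people
instance (stalls : Int) (people : Int) : Decidable (Pre_solution_dequeue stalls people) := by unfold Pre_solution_dequeue; infer_instance

def pvWitness_solution_dequeue : Int × Int := (1000, 17)

def Spec_solution_dequeue (stalls : Int) (people : Int) (out : String) : Prop := out = solution_dequeue_alt stalls people
instance (stalls : Int) (people : Int) (out : String) : Decidable (Spec_solution_dequeue stalls people out) := by unfold Spec_solution_dequeue; infer_instance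

-- ===== CLAIM (what is proved, stated in full; the proofs are below) =====
def Claim_equal_solution_dequeue : Prop := ∀ (stalls : Int) (people : Int), Dom_solution_dequeue stalls people → Pre_solution_dequeue stalls people → Spec_solution_dequeue stalls people (solution_dequeue stalls people)

-- ===== LEMMAS AND PROOFS =====

-- one-list model of the deque loop (proof helper): deque = front ++ back.reverse
def pvLoopSpec (dists : List Int) (left right : Int) : Nat → Int × Int
  | 0 => (left, right)
  | n+1 =>
    match dists with
    | [] => (left, right)
    | dist :: rest =>
      let left := PySem.Int.floordiv dist 2
      let right := dist - left
      let p := if left ≥ right then (left, right) else (right, left)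
      let left := p.1 - 1
      let right := p.2
      let q := if left ≥ right then (left, right) else (right, left)
      pvLoopSpec (rest ++ [q.1, q.2]) q.1 q.2 n

-- the two-list loop computes the one-list loop on front ++ back.reverse
theorem pvLoopA_eq_spec : ∀ (n : Nat) (front back : List Int) (l r : Int),
    pvLoopA front back l r n = pvLoopSpec (front ++ back.reverse) l r n := by
  intro n
  induction n with
  | zero => intro front back l r; rfl
  | succ n ih =>
    intro front back l r
    match front with
    | d :: f =>
      show pvLoopA (d :: f) back l r (n + 1) = _
      rw [pvLoopA, pvPopleft]
      rw [show ((d :: f) ++ back.reverse) = d :: (f ++ back.reverse) from rfl, pvLoopSpec]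
      simp only [ih]
      congr 1
      simp
    | [] =>
      show pvLoopA [] back l r (n + 1) = _
      rw [pvLoopA, pvPopleft]
      match hb : back.reverse with
      | [] => simp [pvLoopSpec]
      | d :: f =>
        simp only [List.nil_append, pvLoopSpec]
        simp [ih]

-- BFS node values: pvV stalls k is the gap popped at (1-indexed) position k in A's deque.
def pvV (stalls : Int) (n : Nat) : Int :=
  if n ≤ 1 then stalls
  else if n % 2 = 0 then PySem.Int.floordiv (pvV stalls (n / 2)) 2
  else PySem.Int.floordiv (pvV stalls (n / 2) - 1) 2
termination_by n
decreasing_by all_goals omega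

theorem pvV_one (stalls : Int) : pvV stalls 1 = stalls := by
  rw [pvV]; norm_num

theorem fd_two (d : Int) : PySem.Int.floordiv d 2 = d / 2 :=
  PySem.Int.floordiv_eq_ediv_of_pos (by norm_num)

theorem pvV_even (stalls : Int) (k : Nat) (hk : 1 ≤ k) :
    pvV stalls (2 * k) = PySem.Int.floordiv (pvV stalls k) 2 := by
  rw [pvV]
  have h1 : ¬ (2 * k ≤ 1) := by omega
  have h3 : 2 * k / 2 = k := by omega
  simp [h1, h3]

theorem pvV_odd (stalls : Int) (k : Nat) (hk : 1 ≤ k) :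
    pvV stalls (2 * k + 1) = PySem.Int.floordiv (pvV stalls k - 1) 2 := by
  rw [pvV]
  have h1 : ¬ (2 * k + 1 ≤ 1) := by omega
  have h3 : (2 * k + 1) / 2 = k := by omega
  simp [h1, h3]

-- one iteration of A's body: the swap dance on gap d produces (d//2, (d-1)//2)
theorem pvLoopSpec_step (d : Int) (rest : List Int) (l r : Int) (n : Nat) :
    pvLoopSpec (d :: rest) l r (n + 1) =
      pvLoopSpec (rest ++ [PySem.Int.floordiv d 2, PySem.Int.floordiv (d - 1) 2])
        (PySem.Int.floordiv d 2) (PySem.Int.floordiv (d - 1) 2) n := by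
  have key : ∀ (a b c e : Int), a = c → b = e →
      pvLoopSpec (rest ++ [a, b]) a b n = pvLoopSpec (rest ++ [c, e]) c e n := by
    intro a b c e h1 h2; rw [h1, h2]
  show (let left := PySem.Int.floordiv d 2
        let right := d - left
        let p := if left ≥ right then (left, right) else (right, left)
        let left := p.1 - 1
        let right := p.2
        let q := if left ≥ right then (left, right) else (right, left)
        pvLoopSpec (rest ++ [q.1, q.2]) q.1 q.2 n) = _
  simp only [fd_two]
  split_ifs <;> exact key _ _ _ _ (by omega) (by omega)

-- deque invariant: when position k is at the front, the deque holds pvV of [k, 2k)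
theorem pvLoopSpec_inv (stalls : Int) : ∀ (n k : Nat), 1 ≤ k → ∀ (l r : Int),
    pvLoopSpec ((List.range' k k).map (pvV stalls)) l r (n + 1) =
      (PySem.Int.floordiv (pvV stalls (k + n)) 2,
       PySem.Int.floordiv (pvV stalls (k + n) - 1) 2) := by
  intro n
  induction n with
  | zero =>
    intro k hk l r
    obtain ⟨m, rfl⟩ : ∃ m, k = m + 1 := ⟨k - 1, by omega⟩
    rw [List.range'_succ, List.map_cons, pvLoopSpec_step]
    simp [pvLoopSpec]
  | succ n ih =>
    intro k hk l r
    obtain ⟨m, rfl⟩ : ∃ m, k = m + 1 := ⟨k - 1, by omega⟩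
    rw [List.range'_succ, List.map_cons, pvLoopSpec_step]
    have h2k : pvV stalls (2 * (m + 1)) = PySem.Int.floordiv (pvV stalls (m + 1)) 2 :=
      pvV_even stalls (m + 1) (by omega)
    have h2k1 : pvV stalls (2 * (m + 1) + 1) = PySem.Int.floordiv (pvV stalls (m + 1) - 1) 2 :=
      pvV_odd stalls (m + 1) (by omega)
    have hidx : List.range' (m + 2) (m + 2) =
        List.range' (m + 2) m ++ [2 * (m + 1), 2 * (m + 1) + 1] := by
      rw [List.range'_concat, List.range'_concat, List.append_assoc]
      congr 1
      simp only [List.cons_append, List.nil_append, one_mul]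
      rw [show m + 2 + m = 2 * (m + 1) from by omega,
          show m + 2 + (m + 1) = 2 * (m + 1) + 1 from by omega]
    have hlist : (List.range' (m + 2) m).map (pvV stalls) ++
        [PySem.Int.floordiv (pvV stalls (m + 1)) 2, PySem.Int.floordiv (pvV stalls (m + 1) - 1) 2] =
        (List.range' (m + 2) (m + 2)).map (pvV stalls) := by
      rw [hidx, List.map_append]
      simp [h2k, h2k1]
    rw [hlist, ih (m + 2) (by omega)]
    rw [show m + 2 + n = m + 1 + (n + 1) from by omega]

-- accumulator law for the bit-reversal loop
theorem pvRevBits_acc : ∀ (L i a : Nat), pvRevBits L i a = a * 2 ^ L + pvRevBits L i 0 := by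
  intro L
  induction L with
  | zero => intro i a; simp [pvRevBits]
  | succ l ih =>
    intro i a
    rw [pvRevBits, pvRevBits, ih (i / 2) (2 * a + i % 2), ih (i / 2) (2 * 0 + i % 2)]
    ring_nf

theorem log2_step (n : Nat) (h : 2 ≤ n) : Nat.log2 n = Nat.log2 (n / 2) + 1 := by
  rw [Nat.log2_def]; simp [h]

-- closed form for the BFS node value: pvV stalls p = (stalls - rev(p - 2^L)) // 2^L, L = log2 p
theorem pvV_closed (stalls : Int) : ∀ (p : Nat), 1 ≤ p →
    pvV stalls p =
      PySem.Int.floordiv (stalls - (pvRevBits (Nat.log2 p) (p - 2 ^ Nat.log2 p) 0 : Int))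
        ((2 : Int) ^ Nat.log2 p) := by
  intro p
  induction p using Nat.strong_induction_on with
  | _ p ih =>
    intro hp
    by_cases h1 : p = 1
    · subst h1
      have : Nat.log2 1 = 0 := by rw [Nat.log2_def]; simp
      rw [this, pvV_one]
      simp [pvRevBits]
    · have hp2 : 2 ≤ p := by omega
      set k := p / 2 with hk
      set b := p % 2 with hb
      have hk1 : 1 ≤ k := by omega
      have hpk : p = 2 * k + b := by omega
      have hb2 : b < 2 := by omega
      have hlog : Nat.log2 p = Nat.log2 k + 1 := by
        rw [log2_step p hp2, ← hk]
      set L := Nat.log2 k with hL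
      have hkle : 2 ^ L ≤ k := Nat.log2_self_le (by omega)
      -- the subtracted index decomposes
      have hsub : p - 2 ^ (L + 1) = 2 * (k - 2 ^ L) + b := by
        have : 2 ^ (L + 1) = 2 * 2 ^ L := by ring
        omega
      -- one unfolding of the reversal loop
      have hrev1 : pvRevBits (L + 1) (p - 2 ^ (L + 1)) 0 = pvRevBits L (k - 2 ^ L) b := by
        rw [hsub, pvRevBits]
        have e1 : (2 * (k - 2 ^ L) + b) / 2 = k - 2 ^ L := by omega
        have e2 : (2 * (k - 2 ^ L) + b) % 2 = b := by omega
        rw [e1, e2]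
        congr 1
        omega
      have hrev : (pvRevBits (L + 1) (p - 2 ^ (L + 1)) 0 : Nat) =
          b * 2 ^ L + pvRevBits L (k - 2 ^ L) 0 := by
        rw [hrev1, pvRevBits_acc]
      -- pvV at p in terms of pvV at k
      have hstep : pvV stalls p = PySem.Int.floordiv (pvV stalls k - (b : Int)) 2 := by
        rcases (by omega : b = 0 ∨ b = 1) with hb0 | hb1
        · rw [hb0]; simp only [Int.natCast_zero, sub_zero]
          rw [show p = 2 * k by omega]
          exact pvV_even stalls k hk1
        · rw [hb1]; rw [show p = 2 * k + 1 by omega]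
          exact_mod_cast pvV_odd stalls k hk1
      rw [hstep, ih k (by omega) hk1, hlog]
      rw [fd_two, PySem.Int.floordiv_eq_ediv_of_pos (by positivity),
          PySem.Int.floordiv_eq_ediv_of_pos (by positivity)]
      have hmove : (stalls - (pvRevBits L (k - 2 ^ L) 0 : Int)) / (2 : Int) ^ L - (b : Int) =
          (stalls - (pvRevBits (L + 1) (p - 2 ^ (L + 1)) 0 : Int)) / (2 : Int) ^ L := by
        have hne : ((2 : Int) ^ L) ≠ 0 := by positivity
        have := Int.add_mul_ediv_right
          (stalls - (pvRevBits (L + 1) (p - 2 ^ (L + 1)) 0 : Int)) (b : Int) hne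
        have harg : stalls - (pvRevBits (L + 1) (p - 2 ^ (L + 1)) 0 : Int) + (b : Int) * 2 ^ L =
            stalls - (pvRevBits L (k - 2 ^ L) 0 : Int) := by
          rw [hrev]; push_cast; ring
        rw [harg] at this
        omega
      rw [hmove, Int.ediv_ediv_of_nonneg (by positivity)]
      ring_nf

-- bit_length of a positive Nat cast is log2 + 1
theorem bitLength_eq_log2 : ∀ (p : Nat), 1 ≤ p →
    PySem.Int.bitLength (p : Int) = Nat.log2 p + 1 := by
  intro p
  induction p using Nat.strong_induction_on with
  | _ p ih =>
    intro hp
    by_cases h1 : p = 1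
    · subst h1
      have : Nat.log2 1 = 0 := by rw [Nat.log2_def]; simp
      rw [this]; decide
    · have hp2 : 2 ≤ p := by omega
      rw [PySem.Int.bitLength_natCast (by omega : 0 < p), ih (p / 2) (by omega) (by omega),
          log2_step p hp2]

-- ===== VERDICT (by name: the statement is the Claim_ definition above) =====
theorem solution_dequeue_spec : Claim_equal_solution_dequeue := by
  intro stalls people _ hpre
  unfold Spec_solution_dequeue
  by_cases h0 : people = 0
  · subst h0
    simp [solution_dequeue, solution_dequeue_alt, pvLoopA]
  · have hppos : 0 < people := lt_of_le_of_ne hpre (Ne.symm h0)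
    obtain ⟨n, hn⟩ : ∃ n, people.toNat = n + 1 := ⟨people.toNat - 1, by omega⟩
    have hcast : ((people.toNat : Nat) : Int) = people := Int.toNat_of_nonneg hpre
    unfold solution_dequeue solution_dequeue_alt
    rw [if_neg h0]
    have hinit : ([stalls] : List Int) = (List.range' 1 1).map (pvV stalls) := by
      simp [List.range'_succ, pvV_one]
    rw [hn, pvLoopA_eq_spec, List.reverse_nil, List.append_nil, hinit, pvLoopSpec_inv stalls n 1 (by omega)]
    have hbl2 : PySem.Int.bitLength people = Nat.log2 people.toNat + 1 := by
      conv_lhs => rw [← hcast]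
      exact bitLength_eq_log2 people.toNat (by omega)
    have hbl : PySem.Int.bitLength people - 1 = Nat.log2 people.toNat := by omega
    rw [hbl]
    have hv := pvV_closed stalls people.toNat (by omega)
    rw [show 1 + n = people.toNat by omega, hv, ← hn]
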